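-- pv_equiv track=rewrite | github.com/jimbarrett27/AdventOfCode | 2015/ex_11.py | _increment_base_26
-- ===== SOURCE A (Python) =====
-- def _increment_base_26(numb: list[int]):
--
--     done = False
--     num_len = len(numb)
--     for i in range(len(numb)):
--         ind = num_len -i - 1
--         if numb[ind] == 25:
--             numb[ind] = 0
--         else:
--             numb[ind] = numb[ind] + 1
--             done = True
--             break
--
--     if not done:
--         numb = [1] + numb
--
--     return numb
-- ===== SOURCE B (Python) =====
-- # Stack-based rewrite: consume the digits from an explicit stack (no indices,
-- # no early break, no mutation of the argument) and build the output digits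
-- # back-to-front behind a carry flag, reversing once at the end.
-- # Note: A mutates its argument in place on the non-overflow path; B never does
-- # (the equivalence is about the return value).
-- def _increment_base_26(numb: list[int]):
--     stack = list(numb)
--     out = []
--     done = False
--     while stack:
--         x = stack.pop()
--         if done:
--             out.append(x)
--         elif x == 25:
--             out.append(0)
--         else:
--             out.append(x + 1)
--             done = True
--     if not done:
--         out.append(1)
--     out.reverse()
--     return out
-- ===== Notes on version B (the rewrite author's own statement) =====
-- stated objective: alternative
-- what changed: A walks indices over the list, mutating digits in place with an explicit ==25 check and an early break (prepending 1 on overflow); B never touches the input: it pops every digit off an explicit stack, emits the new digits back-to-front behind a done flag with no break, and reverses the output once at the end.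
import Mathlib
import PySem

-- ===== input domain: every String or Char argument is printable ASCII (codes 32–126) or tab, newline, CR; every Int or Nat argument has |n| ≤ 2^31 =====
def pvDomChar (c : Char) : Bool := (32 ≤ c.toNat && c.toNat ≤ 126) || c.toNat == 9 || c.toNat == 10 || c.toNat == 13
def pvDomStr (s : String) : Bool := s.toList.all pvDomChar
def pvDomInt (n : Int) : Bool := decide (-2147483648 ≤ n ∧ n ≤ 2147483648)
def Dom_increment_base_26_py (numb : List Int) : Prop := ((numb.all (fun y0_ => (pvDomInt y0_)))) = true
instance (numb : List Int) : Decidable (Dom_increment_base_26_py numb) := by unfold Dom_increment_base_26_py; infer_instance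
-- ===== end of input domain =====

-- B pops every digit off an explicit stack and emits the result back-to-front behind a
-- done flag (no indices, no early break), reversing once at the end; A mutates its
-- argument in place (the equivalence proved here is about the return value).

-- ===== PORT A =====
-- the for-loop over range(len(numb)): fuel = remaining iterations, i = loop variable,
-- nb = the (mutated) list; returns (nb, done)
def pvAGo (nb : List Int) (fuel i : Nat) : List Int × Bool :=
  match fuel with
  | 0 => (nb, false)
  | Nat.succ f =>
    let ind := nb.length - i - 1
    let v := nb.getD ind 0
    if v = 25 then pvAGo (nb.set ind 0) f (i + 1)
    else (nb.set ind (v + 1), true)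

def increment_base_26_py (numb : List Int) : List Int :=
  let r := pvAGo numb numb.length 0
  if r.2 then r.1 else 1 :: r.1

-- ===== PORT B =====
-- the `while stack: x = stack.pop()` loop = a fold over numb.reverse;
-- state = (out, done), out grows by append exactly as Python's out.append
def pvBStep (s : List Int × Bool) (x : Int) : List Int × Bool :=
  if s.2 then (s.1 ++ [x], true)
  else if x = 25 then (s.1 ++ [0], false)
  else (s.1 ++ [x + 1], true)

def increment_base_26_py_alt (numb : List Int) : List Int :=
  let s := numb.reverse.foldl pvBStep ([], false)
  let out := if s.2 then s.1 else s.1 ++ [1]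
  out.reverse

-- ===== PRECONDITION & SPEC =====
def Spec_increment_base_26_py (numb : List Int) (out : List Int) : Prop := out = increment_base_26_py_alt numb
instance (numb : List Int) (out : List Int) : Decidable (Spec_increment_base_26_py numb out) := by unfold Spec_increment_base_26_py; infer_instance

-- ===== CLAIM (what is proved, stated in full; the proofs are below) =====
def Claim_equal_increment_base_26_py : Prop := ∀ (numb : List Int), Dom_increment_base_26_py numb → Spec_increment_base_26_py numb (increment_base_26_py numb)

-- ===== LEMMAS AND PROOFS =====

-- once done is true, the fold only copies the remaining digits
theorem pvBStep_done (l : List Int) : ∀ (acc : List Int),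
    l.foldl pvBStep (acc, true) = (acc ++ l, true) := by
  induction l with
  | nil => intro acc; simp
  | cons x xs ih =>
    intro acc
    simp [pvBStep, ih (acc ++ [x])]

-- each step's effect factors as append of its effect from the empty accumulator
theorem pvBStep_fst (acc : List Int) (d : Bool) (x : Int) :
    pvBStep (acc, d) x = (acc ++ (pvBStep ([], d) x).1, (pvBStep ([], d) x).2) := by
  simp only [pvBStep]
  split_ifs <;> simp

-- the accumulator factors out of the fold
theorem pvBStep_factor (l : List Int) : ∀ (acc : List Int) (d : Bool),
    l.foldl pvBStep (acc, d) =
      (acc ++ (l.foldl pvBStep ([], d)).1, (l.foldl pvBStep ([], d)).2) := by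
  induction l with
  | nil => intro acc d; simp
  | cons x xs ih =>
    intro acc d
    simp only [List.foldl_cons]
    rw [pvBStep_fst acc d x]
    rw [show pvBStep ([], d) x = ((pvBStep ([], d) x).1, (pvBStep ([], d) x).2) from rfl]
    rw [ih (acc ++ (pvBStep ([], d) x).1) (pvBStep ([], d) x).2,
        ih (pvBStep ([], d) x).1 (pvBStep ([], d) x).2]
    simp [List.append_assoc]

-- the loop over ys ++ [x], started at i+1, never touches the last element
theorem pvAGo_shift (fuel : Nat) : ∀ (i : Nat) (ys : List Int) (x : Int),
    i + fuel ≤ ys.length →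
    pvAGo (ys ++ [x]) fuel (i + 1) = ((pvAGo ys fuel i).1 ++ [x], (pvAGo ys fuel i).2) := by
  induction fuel with
  | zero => intro i ys x _; simp [pvAGo]
  | succ f ih =>
    intro i ys x h
    have hind : (ys ++ [x]).length - (i + 1) - 1 = ys.length - i - 1 := by
      simp
    have hlt : ys.length - i - 1 < ys.length := by omega
    have hget : (ys ++ [x]).getD (ys.length - i - 1) 0 = ys.getD (ys.length - i - 1) 0 := by
      simp [List.getD_eq_getElem?_getD, List.getElem?_append_left hlt]
    simp only [pvAGo, hind, hget]
    split
    · rw [List.set_append_left _ _ hlt]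
      have := ih (i + 1) (ys.set (ys.length - i - 1) 0) x (by simp only [List.length_set]; omega)
      simpa using this
    · simp [List.set_append_left _ _ hlt]

theorem portA_append_not25 (ys : List Int) (x : Int) (hx : x ≠ 25) :
    increment_base_26_py (ys ++ [x]) = ys ++ [x + 1] := by
  simp only [increment_base_26_py, pvAGo, List.length_append, List.length_singleton]
  have hget : (ys ++ [x]).getD ys.length 0 = x := by
    simp [List.getD_eq_getElem?_getD]
  simp [hx, List.set_append_right]

theorem portA_append_25 (ys : List Int) :
    increment_base_26_py (ys ++ [25]) = increment_base_26_py ys ++ [0] := by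
  simp only [increment_base_26_py, pvAGo, List.length_append, List.length_singleton]
  have h1 : ys.length + 1 - 0 - 1 = ys.length := by omega
  have hget : (ys ++ [(25 : Int)]).getD ys.length 0 = 25 := by
    simp [List.getD_eq_getElem?_getD]
  have hset : (ys ++ [(25 : Int)]).set ys.length 0 = ys ++ [0] := by
    simp
  simp only [h1, hget, hset]
  rw [pvAGo_shift ys.length 0 ys 0 (by omega)]
  by_cases hd : (pvAGo ys ys.length 0).2 <;> simp [hd]

theorem portB_append_not25 (ys : List Int) (x : Int) (hx : x ≠ 25) :
    increment_base_26_py_alt (ys ++ [x]) = ys ++ [x + 1] := by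
  have hstep : pvBStep ([], false) x = ([x + 1], true) := by simp [pvBStep, hx]
  simp only [increment_base_26_py_alt, List.reverse_append, List.reverse_singleton,
    List.singleton_append, List.foldl_cons, hstep, pvBStep_done]
  simp

theorem portB_append_25 (ys : List Int) :
    increment_base_26_py_alt (ys ++ [25]) = increment_base_26_py_alt ys ++ [0] := by
  have hstep : pvBStep ([], false) 25 = ([0], false) := by simp [pvBStep]
  simp only [increment_base_26_py_alt, List.reverse_append, List.reverse_singleton,
    List.singleton_append, List.foldl_cons, hstep]
  rw [pvBStep_factor ys.reverse [0] false]
  by_cases hd : (ys.reverse.foldl pvBStep ([], false)).2 <;> simp [hd] <;> split <;> rfl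

theorem ports_agree (numb : List Int) :
    increment_base_26_py numb = increment_base_26_py_alt numb := by
  induction numb using List.reverseRecOn with
  | nil => simp [increment_base_26_py, increment_base_26_py_alt, pvAGo]
  | append_singleton ys x ih =>
    by_cases hx : x = 25
    · subst hx
      rw [portA_append_25, portB_append_25, ih]
    · rw [portA_append_not25 ys x hx, portB_append_not25 ys x hx]

-- ===== VERDICT (by name: the statement is the Claim_ definition above) =====
theorem increment_base_26_py_spec : Claim_equal_increment_base_26_py := by
  intro numb _
  exact ports_agree numb
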